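-- pv_equiv track=rewrite | github.com/rccmodena/kattis_problems | problems/u/unlockpattern/unlockpattern.py | coordenates
-- ===== SOURCE A (Python) =====
-- def coordenates(patterns, value):
--     coordenates = [0, 0]
--     for i in range(3):
--         if value in patterns[i]:
--             coordenates[1] = i
--             break
--     coordenates[0] = patterns[coordenates[1]].index(value)
--
--     return coordenates
-- ===== SOURCE B (Python) =====
-- def coordenates(patterns, value):
--     # Build a first-occurrence index of every cell in the scanned rows once,
--     # then answer by a single dict lookup (KeyError if the value is absent).
--     index = {}
--     for i, row in enumerate(patterns[:3]):
--         for j, v in enumerate(row):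
--             index.setdefault(v, [j, i])
--     return index[value]
-- ===== Notes on version B (the rewrite author's own statement) =====
-- stated objective: alternative
-- what changed: Instead of A's search (a membership loop picking the row, then a .index pass for the column), B never searches: it builds a value->[col,row] first-occurrence dictionary over all cells of the first three rows in one pass and answers by a single lookup.
import Mathlib
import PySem

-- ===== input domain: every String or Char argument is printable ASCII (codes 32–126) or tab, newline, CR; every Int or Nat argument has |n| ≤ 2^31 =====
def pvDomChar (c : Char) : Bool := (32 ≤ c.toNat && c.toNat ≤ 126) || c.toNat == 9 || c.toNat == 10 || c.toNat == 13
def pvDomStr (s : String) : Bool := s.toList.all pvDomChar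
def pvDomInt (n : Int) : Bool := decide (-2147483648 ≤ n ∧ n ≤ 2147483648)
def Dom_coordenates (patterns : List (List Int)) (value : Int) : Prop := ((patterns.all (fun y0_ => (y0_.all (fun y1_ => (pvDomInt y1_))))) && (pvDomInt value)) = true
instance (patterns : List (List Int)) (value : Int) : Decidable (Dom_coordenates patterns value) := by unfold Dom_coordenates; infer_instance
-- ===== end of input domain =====

-- B replaces A's two-phase search (row-membership loop, then a .index pass) with a
-- first-occurrence value->[col,row] dictionary built over all cells once, answered by one lookup;
-- objective: alternative, same cost.


-- ===== PORT A =====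
-- A's 'for i in range(3): if value in patterns[i]: coordenates[1] = i; break'
-- (pyGet? none = IndexError in Python; those inputs are outside Pre_, we keep the default 0 there)
def coordRowLoopA (patterns : List (List Int)) (value : Int) : List Nat → Nat
  | [] => 0
  | i :: rest =>
    match PySem.List.pyGet? patterns (i : Int) with
    | none => 0
    | some row => if row.contains value then i else coordRowLoopA patterns value rest

def coordenates (patterns : List (List Int)) (value : Int) : List Int :=
  let r := coordRowLoopA patterns value [0, 1, 2]
  let c : Nat :=
    match PySem.List.pyGet? patterns (r : Int) with
    | none => 0       -- IndexError in Python; outside Pre_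
    | some row => (PySem.List.index? row value).getD 0   -- ValueError when none; outside Pre_
  [(c : Int), (r : Int)]

-- ===== PORT B =====
-- 'for i, row in enumerate(patterns[:3]): for j, v in enumerate(row): index.setdefault(v, [j, i])'
def buildIndex (patterns : List (List Int)) : PySem.Dict Int (List Int) :=
  ((PySem.List.enumerate (patterns.take 3))).foldl
    (fun d p => (PySem.List.enumerate p.2).foldl
      (fun d q => d.setdefault q.2 [q.1, p.1]) d)
    PySem.Dict.empty

def coordenates_alt (patterns : List (List Int)) (value : Int) : List Int :=
  match (buildIndex patterns).get? value with
  | some c => c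
  | none => []      -- KeyError in Python; outside Pre_

-- ===== PRECONDITION & SPEC =====
-- Pre_ holds exactly when the value occurs in one of the first three rows (only those are
-- scanned by A); otherwise Python A raises IndexError or ValueError and returns nothing.
def Pre_coordenates (patterns : List (List Int)) (value : Int) : Prop :=
  ((patterns.take 3).any (fun row => row.contains value)) = true
instance (patterns : List (List Int)) (value : Int) : Decidable (Pre_coordenates patterns value) := by unfold Pre_coordenates; infer_instance

def pvWitness_coordenates : List (List Int) × Int := ([[1, 2, 3], [4, 5, 6], [7, 8, 9]], 5)

def Spec_coordenates (patterns : List (List Int)) (value : Int) (out : List Int) : Prop := out = coordenates_alt patterns value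
instance (patterns : List (List Int)) (value : Int) (out : List Int) : Decidable (Spec_coordenates patterns value out) := by unfold Spec_coordenates; infer_instance

-- ===== CLAIM (what is proved, stated in full; the proofs are below) =====
def Claim_equal_coordenates : Prop := ∀ (patterns : List (List Int)) (value : Int), Dom_coordenates patterns value → Pre_coordenates patterns value → Spec_coordenates patterns value (coordenates patterns value)

-- ===== LEMMAS AND PROOFS =====

-- get? looks up the FIRST match in items, so appending a fresh pair only matters on a miss
lemma get?_append_single (l : List (Int × List Int)) (k x : Int) (v : List Int) :
    (PySem.Dict.mk (l ++ [(k, v)])).get? x =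
      (match (PySem.Dict.mk l).get? x with
       | some w => some w
       | none => if x = k then some v else none) := by
  induction l with
  | nil =>
    have h0 : (PySem.Dict.mk ([] : List (Int × List Int))).get? x = none := rfl
    rw [List.nil_append, PySem.Dict.get?_mk_cons, h0]
    by_cases h : x = k
    · simp [h]
    · simp [h]
      exact fun e => h e.symm
  | cons p rest ih =>
    obtain ⟨pk, pv⟩ := p
    by_cases h : pk = x
    · simp [PySem.Dict.get?_mk_cons, h]
    · simpa [PySem.Dict.get?_mk_cons, h] using ih

lemma get?_setdefault (d : PySem.Dict Int (List Int)) (k x : Int) (v : List Int) :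
    (d.setdefault k v).get? x =
      (match d.get? x with
       | some w => some w
       | none => if x = k then some v else none) := by
  unfold PySem.Dict.setdefault
  by_cases hc : d.contains k
  · simp only [hc, if_true]
    cases hx : d.get? x with
    | some w => simp
    | none =>
      simp only []
      by_cases hxk : x = k
      · subst hxk
        have : (d.get? x).isSome := by rw [← PySem.Dict.contains_eq_isSome_get?]; exact hc
        rw [hx] at this; simp at this
      · simp [hxk]
  · simp only [hc]
    have : d = PySem.Dict.mk d.items := rfl
    rw [this]
    exact get?_append_single d.items k x v

lemma get?_foldl_setdefault (cells : List (Int × List Int)) (d : PySem.Dict Int (List Int)) (x : Int) :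
    (cells.foldl (fun d q => d.setdefault q.1 q.2) d).get? x =
      (match d.get? x with
       | some w => some w
       | none => (cells.find? (fun q => q.1 == x)).map (·.2)) := by
  induction cells generalizing d with
  | nil => cases hx : d.get? x <;> simp [hx]
  | cons q rest ih =>
    obtain ⟨qk, qv⟩ := q
    simp only [List.foldl_cons, ih, get?_setdefault]
    cases hx : d.get? x with
    | some w => simp
    | none =>
      by_cases h : x = qk
      · subst h; simp
      · simp [Ne.symm h, h]

-- the cells of one row, as flattened by the scan
def rowCells (i : Int) (row : List Int) : List (Int × List Int) :=
  (PySem.List.enumerate row).map (fun q => (q.2, [q.1, i]))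

-- the flattened cell list of one row, searched for 'value', is the row's first index
lemma rowFind (row : List Int) (s : Int) (i : Int) (value : Int) :
    (((PySem.List.enumerate row s).map (fun q => (q.2, [q.1, i]))).find?
        (fun q => q.1 == value)).map (·.2)
      = (List.idxOf? value row).map (fun j => [s + (j : Int), i]) := by
  induction row generalizing s with
  | nil => simp [PySem.List.enumerate]
  | cons v rest ih =>
    by_cases h : v = value
    · subst h
      simp [PySem.List.enumerate, List.idxOf?_cons]
    · have hb : (v == value) = false := beq_eq_false_iff_ne.mpr h
      rw [show PySem.List.enumerate (v :: rest) s = (s, v) :: PySem.List.enumerate rest (s + 1) from rfl]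
      simp only [List.map_cons, List.find?_cons, hb, List.idxOf?_cons]
      rw [ih (s + 1)]
      cases List.idxOf? value rest with
      | none => simp
      | some j => simp; ring

lemma rowFind_none {row : List Int} {value : Int} (h : value ∉ row) (i : Int) :
    (rowCells i row).find? (fun q => q.1 == value) = none := by
  have := rowFind row 0 i value
  rw [List.idxOf?_eq_none_iff.mpr (by simpa using h)] at this
  simpa [rowCells] using this

lemma rowFind_mem {row : List Int} {value : Int} (h : value ∈ row) (i : Int) :
    ∃ pr, (rowCells i row).find? (fun q => q.1 == value) = some pr ∧
      pr.2 = [((List.idxOf? value row).getD 0 : Int), i] := by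
  have hr := rowFind row 0 i value
  obtain ⟨j, hj⟩ := Option.isSome_iff_exists.mp (List.isSome_idxOf?.mpr h)
  rw [hj] at hr
  cases hf : (rowCells i row).find? (fun q => q.1 == value) with
  | none => rw [rowCells] at hf; rw [hf] at hr; simp at hr
  | some pr =>
    refine ⟨pr, rfl, ?_⟩
    rw [rowCells] at hf; rw [hf] at hr
    simp at hr
    simp [hr, hj]

-- buildIndex looked up at 'value' is the first matching cell of the flattened scan
lemma buildIndex_get? (patterns : List (List Int)) (value : Int) :
    (buildIndex patterns).get? value =
      (((PySem.List.enumerate (patterns.take 3)).flatMap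
          (fun p => (PySem.List.enumerate p.2).map (fun q => (q.2, [q.1, p.1])))).find?
        (fun q => q.1 == value)).map (·.2) := by
  have h1 : buildIndex patterns =
      ((PySem.List.enumerate (patterns.take 3)).flatMap
          (fun p => (PySem.List.enumerate p.2).map (fun q => (q.2, [q.1, p.1])))).foldl
        (fun d q => d.setdefault q.1 q.2) PySem.Dict.empty := by
    unfold buildIndex
    rw [List.foldl_flatMap]
    congr 1
    funext d p
    rw [List.foldl_map]
  rw [h1, get?_foldl_setdefault]
  simp [PySem.Dict.get?_empty]

theorem coordenates_spec : Claim_equal_coordenates := by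
  intro patterns value _ hpre
  unfold Spec_coordenates coordenates coordenates_alt Pre_coordenates at *
  rw [buildIndex_get?]
  match patterns with
  | [] => simp at hpre
  | a :: t =>
    by_cases ha : value ∈ a
    · obtain ⟨pr, hf, hpr⟩ := rowFind_mem ha 0
      match t with
      | [] =>
        have hc : (PySem.List.enumerate ((a :: ([] : List (List Int))).take 3)).flatMap
            (fun p => (PySem.List.enumerate p.2).map (fun q => (q.2, [q.1, p.1])))
            = rowCells 0 a ++ [] := rfl
        rw [hc, List.find?_append, hf]
        simp [coordRowLoopA, ha, PySem.List.index?, hpr, Option.or]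
      | b :: t2 =>
        match t2 with
        | [] =>
          have hc : (PySem.List.enumerate ((a :: b :: ([] : List (List Int))).take 3)).flatMap
              (fun p => (PySem.List.enumerate p.2).map (fun q => (q.2, [q.1, p.1])))
              = rowCells 0 a ++ (rowCells 1 b ++ []) := rfl
          rw [hc, List.find?_append, hf]
          simp [coordRowLoopA, ha, PySem.List.index?, hpr, Option.or]
        | c :: t3 =>
          have hc : (PySem.List.enumerate ((a :: b :: c :: t3).take 3)).flatMap
              (fun p => (PySem.List.enumerate p.2).map (fun q => (q.2, [q.1, p.1])))
              = rowCells 0 a ++ (rowCells 1 b ++ (rowCells 2 c ++ [])) := rfl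
          rw [hc, List.find?_append, hf]
          simp [coordRowLoopA, ha, PySem.List.index?, hpr, Option.or]
    · match t with
      | [] => simp [ha] at hpre
      | b :: t2 =>
        by_cases hb : value ∈ b
        · obtain ⟨pr, hf, hpr⟩ := rowFind_mem hb 1
          match t2 with
          | [] =>
            have hc : (PySem.List.enumerate ((a :: b :: ([] : List (List Int))).take 3)).flatMap
                (fun p => (PySem.List.enumerate p.2).map (fun q => (q.2, [q.1, p.1])))
                = rowCells 0 a ++ (rowCells 1 b ++ []) := rfl
            rw [hc, List.find?_append, List.find?_append, rowFind_none ha 0, hf]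
            simp [coordRowLoopA, ha, hb, PySem.List.index?, hpr, Option.or]
          | c :: t3 =>
            have h1 : PySem.List.pyGet? (a :: b :: c :: t3) (1 : Int) = some b := by
              simpa using PySem.List.pyGet?_natCast (a :: b :: c :: t3) 1
            have hc : (PySem.List.enumerate ((a :: b :: c :: t3).take 3)).flatMap
                (fun p => (PySem.List.enumerate p.2).map (fun q => (q.2, [q.1, p.1])))
                = rowCells 0 a ++ (rowCells 1 b ++ (rowCells 2 c ++ [])) := rfl
            rw [hc, List.find?_append, List.find?_append, rowFind_none ha 0, hf]
            simp [coordRowLoopA, ha, hb, PySem.List.index?, hpr, Option.or, h1]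
        · match t2 with
          | [] => simp [ha, hb] at hpre
          | c :: t3 =>
            have hcv : value ∈ c := by
              simp [List.take] at hpre; tauto
            obtain ⟨pr, hf, hpr⟩ := rowFind_mem hcv 2
            have h1 : PySem.List.pyGet? (a :: b :: c :: t3) (1 : Int) = some b := by
              simpa using PySem.List.pyGet?_natCast (a :: b :: c :: t3) 1
            have h2 : PySem.List.pyGet? (a :: b :: c :: t3) (2 : Int) = some c := by
              simpa using PySem.List.pyGet?_natCast (a :: b :: c :: t3) 2
            have hc : (PySem.List.enumerate ((a :: b :: c :: t3).take 3)).flatMap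
                (fun p => (PySem.List.enumerate p.2).map (fun q => (q.2, [q.1, p.1])))
                = rowCells 0 a ++ (rowCells 1 b ++ (rowCells 2 c ++ [])) := rfl
            rw [hc, List.find?_append, List.find?_append, List.find?_append,
              rowFind_none ha 0, rowFind_none hb 1, hf]
            simp [coordRowLoopA, ha, hb, hcv, PySem.List.index?, hpr, Option.or, h1, h2]
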